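-- pv_equiv track=rewrite | github.com/lkdoyle/ExperimentalCode | SunnyBrookAttentionBorder.py | promptarr
-- ===== SOURCE A (Python) =====
-- def promptarr(le):
--     promptarr = []
--     for i in range(int(le)):
--         if i % 2 == 0:
--             promptarr.append(0)
--         else:
--             promptarr.append(1)
--     return promptarr
-- ===== SOURCE B (Python) =====
-- def promptarr(le):
--     n = int(le)
--     return ([0, 1] * ((n + 1) // 2))[:n]
-- ===== Notes on version B (the rewrite author's own statement) =====
-- stated objective: idiomatic
-- what changed: Replaces the per-element loop with its parity branch by list repetition ([0,1]*((n+1)//2)) followed by a single slice [:n].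
import Mathlib
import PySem

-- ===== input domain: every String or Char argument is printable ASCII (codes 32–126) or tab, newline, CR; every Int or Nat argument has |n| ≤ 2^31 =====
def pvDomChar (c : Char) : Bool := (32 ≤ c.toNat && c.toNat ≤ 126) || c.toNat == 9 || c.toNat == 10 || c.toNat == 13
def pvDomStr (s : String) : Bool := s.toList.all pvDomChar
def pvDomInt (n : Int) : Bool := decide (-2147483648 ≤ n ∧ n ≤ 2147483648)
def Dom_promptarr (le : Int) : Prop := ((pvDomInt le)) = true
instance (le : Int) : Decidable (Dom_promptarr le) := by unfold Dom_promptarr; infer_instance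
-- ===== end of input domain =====

-- B builds the alternating 0/1 list by list repetition and one slice instead of a per-element parity loop (idiomatic).


-- ===== PORT A =====
def promptarr (le : Int) : List Int :=
  (PySem.List.pyRange 0 le 1).foldl
    (fun acc i => if PySem.Int.mod i 2 = 0 then acc ++ [0] else acc ++ [1]) []

-- ===== PORT B =====
def promptarr_alt (le : Int) : List Int :=
  let n := le
  PySem.List.slice ((List.replicate (PySem.Int.floordiv (n + 1) 2).toNat ([0, 1] : List Int)).flatten) none (some n)

-- ===== PRECONDITION & SPEC =====
def Spec_promptarr (le : Int) (out : List Int) : Prop := out = promptarr_alt le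
instance (le : Int) (out : List Int) : Decidable (Spec_promptarr le out) := by unfold Spec_promptarr; infer_instance

-- ===== CLAIM (what is proved, stated in full; the proofs are below) =====
def Claim_equal_promptarr : Prop := ∀ (le : Int), Dom_promptarr le → Spec_promptarr le (promptarr le)

-- ===== LEMMAS AND PROOFS =====

-- the alternating pattern of length n
def pvPat (n : Nat) : List Int := (List.range n).map (fun k => if k % 2 = 0 then 0 else 1)

theorem pvPat_succ (n : Nat) :
    pvPat (n + 1) = pvPat n ++ [if n % 2 = 0 then 0 else 1] := by
  simp [pvPat, List.range_succ]

-- A's loop produces the pattern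
theorem promptarr_eq_pat (n : Nat) : promptarr (n : Int) = pvPat n := by
  unfold promptarr
  induction n with
  | zero => simp [PySem.List.pyRange_one_eq_nil, pvPat]
  | succ m ih =>
    rw [show ((m + 1 : Nat) : Int) = (m : Int) + 1 by push_cast; ring,
      PySem.List.pyRange_one_succ_right (by positivity), List.foldl_append, ih, pvPat_succ]
    simp only [List.foldl_cons, List.foldl_nil]
    by_cases h : m % 2 = 0
    · have : PySem.Int.mod (m : Int) 2 = 0 := by
        rw [PySem.Int.mod_eq_emod_of_pos (by norm_num)]; omega
      simp [this, h]; omega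
    · have : PySem.Int.mod (m : Int) 2 ≠ 0 := by
        rw [PySem.Int.mod_eq_emod_of_pos (by norm_num)]; omega
      simp [this, h]; omega

-- the repeated [0,1] block, flattened, is the even-length pattern
theorem flatten_replicate_pat (m : Nat) :
    (List.replicate m ([0, 1] : List Int)).flatten = pvPat (2 * m) := by
  induction m with
  | zero => simp [pvPat]
  | succ k ih =>
    rw [List.replicate_succ', List.flatten_append, ih,
      show 2 * (k + 1) = (2 * k + 1) + 1 by ring, pvPat_succ, pvPat_succ]
    simp [Nat.mul_mod_right]

theorem pat_take (n m : Nat) (h : n ≤ m) : (pvPat m).take n = pvPat n := by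
  simp [pvPat, ← List.map_take, List.take_range, h]

-- B produces the pattern too
theorem promptarr_alt_eq_pat (n : Nat) : promptarr_alt (n : Int) = pvPat n := by
  simp only [promptarr_alt]
  have h1 : PySem.Int.floordiv ((n : Int) + 1) 2 = (((n + 1) / 2 : Nat) : Int) := by
    rw [show ((n : Int) + 1) = ((n + 1 : Nat) : Int) by push_cast; ring]
    exact_mod_cast PySem.Int.floordiv_natCast (n + 1) 2
  rw [h1, PySem.List.slice_to_natCast]
  simp only [Int.toNat_natCast]
  rw [flatten_replicate_pat, pat_take]
  omega

theorem promptarr_neg (le : Int) (h : le < 0) :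
    promptarr le = [] ∧ promptarr_alt le = [] := by
  constructor
  · unfold promptarr
    rw [PySem.List.pyRange_one_eq_nil (by omega)]
    rfl
  · simp only [promptarr_alt]
    have h2 : PySem.Int.floordiv (le + 1) 2 = (le + 1) / 2 :=
      PySem.Int.floordiv_eq_ediv_of_pos (by norm_num)
    have h3 : ((le + 1) / 2).toNat = 0 := by omega
    simp [h2, h3, PySem.List.slice, PySem.List.clampIdx]

-- ===== VERDICT (by name: the statement is the Claim_ definition above) =====
theorem promptarr_spec : Claim_equal_promptarr := by
  intro le _
  unfold Spec_promptarr
  rcases lt_or_ge le 0 with h | h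
  · obtain ⟨h1, h2⟩ := promptarr_neg le h
    rw [h1, h2]
  · obtain ⟨n, rfl⟩ := Int.eq_ofNat_of_zero_le h
    rw [promptarr_eq_pat, promptarr_alt_eq_pat]
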